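-- pv_equiv track=rewrite | github.com/studykit/mcp-jar-indexer | src/tools/list_artifacts.py | parse_version_filter
-- ===== SOURCE A (Python) =====
-- from typing import Any, Dict, List, Optional
--
-- def parse_version_filter(version_filter: str) -> List[tuple[str, str]]:
--   """Parse version filter string into list of constraints.
--
--   Args:
--     version_filter: Version constraint string like "5.3.21", ">=5.3.0", "<6.0.0", ">=5.0.0,<6.0.0"
--
--   Returns:
--     List of (operator, version) tuples
--
--   Raises:
--     ValueError: If version filter format is invalid
--   """
--   constraints: List[tuple[str, str]] = []
--
--   # Split by comma for multiple constraints
--   parts = version_filter.split(",")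
--
--   for part in parts:
--     part = part.strip()
--     if not part:
--       continue
--
--     # Check for operators
--     if part.startswith(">="):
--       constraints.append((">=", part[2:].strip()))
--     elif part.startswith("<="):
--       constraints.append(("<=", part[2:].strip()))
--     elif part.startswith(">"):
--       constraints.append((">", part[1:].strip()))
--     elif part.startswith("<"):
--       constraints.append(("<", part[1:].strip()))
--     elif part.startswith("="):
--       constraints.append(("==", part[1:].strip()))
--     else:
--       # No operator means exact match
--       constraints.append(("==", part))
--
--   return constraints
-- ===== SOURCE B (Python) =====
-- def _classify(part):
--   # part is a non-empty, stripped token; decide the operator from its first char(s)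
--   head = part[0]
--   if head in "<>":
--     if part[1:2] == "=":
--       return (head + "=", part[2:].strip())
--     return (head, part[1:].strip())
--   if head == "=":
--     return ("==", part[1:].strip())
--   return ("==", part)
--
--
-- def parse_version_filter(version_filter):
--   # single character-level scan: accumulate the current token, flush on ','
--   out = []
--   buf = []
--   for ch in version_filter + ",":
--     if ch == ",":
--       part = "".join(buf).strip()
--       buf = []
--       if part:
--         out.append(_classify(part))
--     else:
--       buf.append(ch)
--   return out
-- ===== Notes on version B (the rewrite author's own statement) =====
-- stated objective: alternative
-- what changed: Replaces split-on-comma plus a five-branch startswith chain by a single character-level scanner that accumulates tokens manually and classifies each by inspecting its first one or two characters.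
import Mathlib
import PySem

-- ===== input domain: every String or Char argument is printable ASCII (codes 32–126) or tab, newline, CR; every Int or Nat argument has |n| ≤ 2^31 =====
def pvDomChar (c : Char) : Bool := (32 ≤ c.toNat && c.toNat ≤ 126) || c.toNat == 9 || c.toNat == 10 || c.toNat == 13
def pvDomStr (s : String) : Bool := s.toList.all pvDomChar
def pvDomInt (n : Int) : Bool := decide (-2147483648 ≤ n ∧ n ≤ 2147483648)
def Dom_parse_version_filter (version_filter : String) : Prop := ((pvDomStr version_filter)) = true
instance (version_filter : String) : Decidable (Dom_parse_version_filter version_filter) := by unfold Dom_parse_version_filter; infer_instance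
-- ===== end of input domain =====

-- B replaces A's split-on-comma + five-branch startswith chain by a single
-- character-level scanner with manual token accumulation and first-char
-- classification (objective: alternative decomposition, same cost).

-- ===== PORT A =====
-- literal transliteration of A: split on ",", fold over the parts, append per branch
def parse_version_filter (version_filter : String) : List (String × String) :=
  let parts := PySem.Chars.splitOn version_filter.toList [',']
  parts.foldl (fun constraints part0 =>
    let part := PySem.Chars.strip part0
    if part = [] then constraints
    else if PySem.Chars.startswith part ['>', '='] then
      constraints ++ [(">=", String.ofList (PySem.Chars.strip (PySem.Chars.slice part (some 2) none)))]
    else if PySem.Chars.startswith part ['<', '='] then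
      constraints ++ [("<=", String.ofList (PySem.Chars.strip (PySem.Chars.slice part (some 2) none)))]
    else if PySem.Chars.startswith part ['>'] then
      constraints ++ [(">", String.ofList (PySem.Chars.strip (PySem.Chars.slice part (some 1) none)))]
    else if PySem.Chars.startswith part ['<'] then
      constraints ++ [("<", String.ofList (PySem.Chars.strip (PySem.Chars.slice part (some 1) none)))]
    else if PySem.Chars.startswith part ['='] then
      constraints ++ [("==", String.ofList (PySem.Chars.strip (PySem.Chars.slice part (some 1) none)))]
    else
      constraints ++ [("==", String.ofList part)]) []

-- ===== PORT B =====
-- Source B's _classify: decide the operator from the first one/two characters.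
-- part[1:2] == "=" of `c :: rest` is exactly `rest.take 1 = ['=']` (slice [1:2]);
-- part[2:].strip() of `c :: rest` is `strip (rest.drop 1)`; part[1:] is `rest`.
-- Source B only calls _classify on non-empty tokens (it would raise on ""); the
-- [] case here is unreachable from parse_version_filter_alt.
def pvClassify : List Char → String × String
  | [] => ("==", "")
  | c :: rest =>
    if c = '<' ∨ c = '>' then
      if rest.take 1 = ['='] then
        (String.ofList [c, '='], String.ofList (PySem.Chars.strip (rest.drop 1)))
      else (String.ofList [c], String.ofList (PySem.Chars.strip rest))
    else if c = '=' then ("==", String.ofList (PySem.Chars.strip rest))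
    else ("==", String.ofList (c :: rest))

-- Source B's scanner loop over version_filter + ",": flush buf on ',', else extend it
def pvScan : List Char → List Char → List (String × String) → List (String × String)
  | [], _buf, out => out
  | c :: cs, buf, out =>
    if c = ',' then
      let part := PySem.Chars.strip buf
      pvScan cs [] (if part = [] then out else out ++ [pvClassify part])
    else pvScan cs (buf ++ [c]) out

def parse_version_filter_alt (version_filter : String) : List (String × String) :=
  pvScan (version_filter.toList ++ [',']) [] []

-- ===== PRECONDITION & SPEC =====
def Spec_parse_version_filter (version_filter : String) (out : List (String × String)) : Prop := out = parse_version_filter_alt version_filter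
instance (version_filter : String) (out : List (String × String)) : Decidable (Spec_parse_version_filter version_filter out) := by unfold Spec_parse_version_filter; infer_instance

-- ===== CLAIM (what is proved, stated in full; the proofs are below) =====
def Claim_equal_parse_version_filter : Prop := ∀ (version_filter : String), Dom_parse_version_filter version_filter → Spec_parse_version_filter version_filter (parse_version_filter version_filter)

-- ===== LEMMAS AND PROOFS =====

-- reference splitter: pieces of `l` split at ',' with `pre` prepended to the first
def pvSplit : List Char → List Char → List (List Char)
  | pre, [] => [pre]
  | pre, x :: xs => if x = ',' then pre :: pvSplit [] xs else pvSplit (pre ++ [x]) xs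

-- splitOn.go with a single-char separator computes pvSplit
lemma pvGo_eq : ∀ (fuel : Nat) (l cur : List Char) (acc : List (List Char)),
    l.length ≤ fuel →
    PySem.Chars.splitOn.go [','] fuel l cur acc
      = acc.reverse ++ pvSplit cur.reverse l := by
  intro fuel
  induction fuel with
  | zero =>
    intro l cur acc h
    have : l = [] := List.eq_nil_of_length_eq_zero (Nat.le_zero.mp h)
    subst this
    simp [PySem.Chars.splitOn.go, pvSplit]
  | succ n ih =>
    intro l cur acc h
    cases l with
    | nil => simp [PySem.Chars.splitOn.go, pvSplit]
    | cons c rest =>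
      simp only [PySem.Chars.splitOn.go]
      by_cases hc : c = ','
      · subst hc
        have hp : List.isPrefixOf [','] (',' :: rest) = true := by simp [List.isPrefixOf]
        rw [if_pos hp]
        have := ih rest [] (cur.reverse :: acc) (by simpa using Nat.le_of_succ_le_succ h)
        simpa [pvSplit] using this
      · have hp : List.isPrefixOf [','] (c :: rest) = false := by
          simp only [List.isPrefixOf, Bool.and_eq_false_iff]
          left; simpa [beq_eq_false_iff_ne] using fun h => hc h.symm
        rw [if_neg (by simp [hp])]
        have := ih rest (c :: cur) acc (by simpa using Nat.le_of_succ_le_succ h)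
        simpa [pvSplit, hc] using this

lemma pvSplitOn_eq (s : List Char) :
    PySem.Chars.splitOn s [','] = pvSplit [] s := by
  have := pvGo_eq (s.length + 1) s [] [] (Nat.le_succ _)
  simpa [PySem.Chars.splitOn] using this

-- the per-part result both programs produce, as a filtered map
def pvProc (parts : List (List Char)) : List (String × String) :=
  ((parts.map PySem.Chars.strip).filter (fun p => !p.isEmpty)).map pvClassify

-- per-part agreement: on a nonempty part, A's branch chain = B's first-char classification
lemma pvClassify_eq (part : List Char) (hne : part ≠ []) :
    (if PySem.Chars.startswith part ['>', '='] then
      (">=", String.ofList (PySem.Chars.strip (PySem.Chars.slice part (some 2) none)))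
    else if PySem.Chars.startswith part ['<', '='] then
      ("<=", String.ofList (PySem.Chars.strip (PySem.Chars.slice part (some 2) none)))
    else if PySem.Chars.startswith part ['>'] then
      (">", String.ofList (PySem.Chars.strip (PySem.Chars.slice part (some 1) none)))
    else if PySem.Chars.startswith part ['<'] then
      ("<", String.ofList (PySem.Chars.strip (PySem.Chars.slice part (some 1) none)))
    else if PySem.Chars.startswith part ['='] then
      ("==", String.ofList (PySem.Chars.strip (PySem.Chars.slice part (some 1) none)))
    else ("==", String.ofList part))
    = pvClassify part := by
  cases part with
  | nil => exact absurd rfl hne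
  | cons c rest =>
    have h2 : PySem.Chars.slice (c :: rest) (some 2) none = rest.drop 1 := by
      simp [PySem.Chars.slice_eq_listSlice, PySem.List.slice_from]
    have h1 : PySem.Chars.slice (c :: rest) (some 1) none = rest := by
      simp [PySem.Chars.slice_eq_listSlice, PySem.List.slice_from]
    simp only [h1, h2, pvClassify, PySem.Chars.startswith]
    cases rest with
    | nil =>
      by_cases hgt : c = '>' <;> by_cases hlt : c = '<' <;> by_cases heq : c = '=' <;>
        simp_all [List.isPrefixOf, eq_comm (b := c)]
    | cons d ds =>
      by_cases hgt : c = '>' <;> by_cases hlt : c = '<' <;> by_cases heq : c = '=' <;>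
        by_cases hd : d = '=' <;>
        simp_all [List.isPrefixOf, eq_comm (b := c), eq_comm (b := d)]

-- A's fold with conditional append = pvProc, for any accumulator
lemma pv_fold_eq (parts : List (List Char)) (acc : List (String × String)) :
    parts.foldl (fun constraints part0 =>
      let part := PySem.Chars.strip part0
      if part = [] then constraints
      else if PySem.Chars.startswith part ['>', '='] then
        constraints ++ [(">=", String.ofList (PySem.Chars.strip (PySem.Chars.slice part (some 2) none)))]
      else if PySem.Chars.startswith part ['<', '='] then
        constraints ++ [("<=", String.ofList (PySem.Chars.strip (PySem.Chars.slice part (some 2) none)))]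
      else if PySem.Chars.startswith part ['>'] then
        constraints ++ [(">", String.ofList (PySem.Chars.strip (PySem.Chars.slice part (some 1) none)))]
      else if PySem.Chars.startswith part ['<'] then
        constraints ++ [("<", String.ofList (PySem.Chars.strip (PySem.Chars.slice part (some 1) none)))]
      else if PySem.Chars.startswith part ['='] then
        constraints ++ [("==", String.ofList (PySem.Chars.strip (PySem.Chars.slice part (some 1) none)))]
      else
        constraints ++ [("==", String.ofList part)]) acc
    = acc ++ pvProc parts := by
  induction parts generalizing acc with
  | nil => simp [pvProc]
  | cons p ps ih =>
    simp only [List.foldl_cons]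
    rw [ih]
    by_cases hp : PySem.Chars.strip p = []
    · simp [pvProc, hp]
    · simp only [if_neg hp]
      have hproc : pvProc (p :: ps) = pvClassify (PySem.Chars.strip p) :: pvProc ps := by
        simp [pvProc, hp]
      rw [hproc, ← pvClassify_eq (PySem.Chars.strip p) hp]
      split_ifs <;> simp

-- B's scanner = pvProc over the reference splitter, for any buffer/accumulator
lemma pv_scan_eq (cs : List Char) : ∀ (buf : List Char) (out : List (String × String)),
    pvScan (cs ++ [',']) buf out = out ++ pvProc (pvSplit buf cs) := by
  induction cs with
  | nil =>
    intro buf out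
    by_cases hb : PySem.Chars.strip buf = [] <;>
      simp [pvScan, pvSplit, pvProc, hb]
  | cons c rest ih =>
    intro buf out
    by_cases hc : c = ','
    · subst hc
      simp only [List.cons_append, pvScan]
      by_cases hb : PySem.Chars.strip buf = []
      · simp [hb, ih, pvSplit, pvProc]
      · simp [hb, ih, pvSplit, pvProc]
    · simp only [List.cons_append, pvScan, if_neg hc]
      rw [ih, pvSplit, if_neg hc]

-- ===== VERDICT (by name: the statement is the Claim_ definition above) =====
theorem parse_version_filter_spec : Claim_equal_parse_version_filter := by
  intro s _
  show _ = _
  rw [parse_version_filter, parse_version_filter_alt, pvSplitOn_eq]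
  rw [pv_scan_eq s.toList [] []]
  simpa using pv_fold_eq (pvSplit [] s.toList) []
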